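-- pv_equiv track=rewrite | github.com/Dennis8Hu/CodenamesBot | main.py | text_to_emoji
-- ===== SOURCE A (Python) =====
-- def text_to_emoji(text: str):
--     textToEmojiDictionairy = {
--         "A": ":regional_indicator_a:",
--         "B": ":regional_indicator_b:",
--         "C": ":regional_indicator_c:",
--         "D": ":regional_indicator_d:",
--         "E": ":regional_indicator_e:",
--         "F": ":regional_indicator_f:",
--         "G": ":regional_indicator_g:",
--         "H": ":regional_indicator_h:",
--         "I": ":regional_indicator_i:",
--         "J": ":regional_indicator_j:",
--         "K": ":regional_indicator_k:",
--         "L": ":regional_indicator_l:",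
--         "M": ":regional_indicator_m:",
--         "N": ":regional_indicator_n:",
--         "O": ":regional_indicator_o:",
--         "P": ":regional_indicator_p:",
--         "Q": ":regional_indicator_q:",
--         "R": ":regional_indicator_r:",
--         "S": ":regional_indicator_s:",
--         "T": ":regional_indicator_t:",
--         "U": ":regional_indicator_u:",
--         "V": ":regional_indicator_v:",
--         "W": ":regional_indicator_w:",
--         "X": ":regional_indicator_x:",
--         "Y": ":regional_indicator_y:",
--         "Z": ":regional_indicator_z:",
--         " ": " ",
--         "!": ":grey_exclamation:",
--         "?": ":grey_question:",
--         "0": ":zero:",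
--         "1": ":one:",
--         "2": ":two:",
--         "3": ":three:",
--         "4": ":four:",
--         "5": ":five:",
--         "6": ":six:",
--         "7": ":seven:",
--         "8": ":eight:",
--         "9": ":nine:",
--         "#": ":hash:",
--         "*": ":asterisk:"
--     }
--     emojiText = ""
--     for i in range(0, len(text)):
--         if text[i].upper() in textToEmojiDictionairy:
--             emojiText += "" + textToEmojiDictionairy[text[i].upper()]
--
--     return emojiText
-- ===== SOURCE B (Python) =====
-- def text_to_emoji(text: str):
--     specials = {
--         " ": " ",
--         "!": ":grey_exclamation:",
--         "?": ":grey_question:",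
--         "0": ":zero:",
--         "1": ":one:",
--         "2": ":two:",
--         "3": ":three:",
--         "4": ":four:",
--         "5": ":five:",
--         "6": ":six:",
--         "7": ":seven:",
--         "8": ":eight:",
--         "9": ":nine:",
--         "#": ":hash:",
--         "*": ":asterisk:",
--     }
--     parts = []
--     for ch in text:
--         u = ch.upper()
--         if "A" <= u <= "Z":
--             parts.append(":regional_indicator_" + u.lower() + ":")
--         elif u in specials:
--             parts.append(specials[u])
--     return "".join(parts)
-- ===== Notes on version B (the rewrite author's own statement) =====
-- stated objective: simpler
-- what changed: Replaces A's 41-entry literal dict with a computed f':regional_indicator_{c}:' formula for letters plus a 15-entry special-symbol table, accumulating parts and joining instead of repeated string concatenation.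
import Mathlib
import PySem

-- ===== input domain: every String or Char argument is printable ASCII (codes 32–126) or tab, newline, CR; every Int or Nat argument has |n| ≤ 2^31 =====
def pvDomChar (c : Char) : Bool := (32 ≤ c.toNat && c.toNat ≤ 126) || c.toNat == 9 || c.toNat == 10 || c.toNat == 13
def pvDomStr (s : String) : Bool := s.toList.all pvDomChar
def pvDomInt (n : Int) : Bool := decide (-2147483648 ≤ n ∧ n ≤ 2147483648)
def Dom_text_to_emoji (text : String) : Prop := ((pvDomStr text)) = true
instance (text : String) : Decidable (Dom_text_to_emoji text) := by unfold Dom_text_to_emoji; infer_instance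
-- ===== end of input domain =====

-- B re-implements A's 41-entry dict lookup as a computed formula for letters plus a
-- 15-entry special-symbol table; return value only, equivalence proved on the ASCII domain.

-- ===== PORT A =====
-- A's literal dict, in source order (1-char string keys, kept as List Char).
def pvADict : PySem.Dict (List Char) (List Char) :=
  PySem.Dict.ofList [
    ("A".toList, ":regional_indicator_a:".toList), ("B".toList, ":regional_indicator_b:".toList),
    ("C".toList, ":regional_indicator_c:".toList), ("D".toList, ":regional_indicator_d:".toList),
    ("E".toList, ":regional_indicator_e:".toList), ("F".toList, ":regional_indicator_f:".toList),
    ("G".toList, ":regional_indicator_g:".toList), ("H".toList, ":regional_indicator_h:".toList),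
    ("I".toList, ":regional_indicator_i:".toList), ("J".toList, ":regional_indicator_j:".toList),
    ("K".toList, ":regional_indicator_k:".toList), ("L".toList, ":regional_indicator_l:".toList),
    ("M".toList, ":regional_indicator_m:".toList), ("N".toList, ":regional_indicator_n:".toList),
    ("O".toList, ":regional_indicator_o:".toList), ("P".toList, ":regional_indicator_p:".toList),
    ("Q".toList, ":regional_indicator_q:".toList), ("R".toList, ":regional_indicator_r:".toList),
    ("S".toList, ":regional_indicator_s:".toList), ("T".toList, ":regional_indicator_t:".toList),
    ("U".toList, ":regional_indicator_u:".toList), ("V".toList, ":regional_indicator_v:".toList),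
    ("W".toList, ":regional_indicator_w:".toList), ("X".toList, ":regional_indicator_x:".toList),
    ("Y".toList, ":regional_indicator_y:".toList), ("Z".toList, ":regional_indicator_z:".toList),
    (" ".toList, " ".toList), ("!".toList, ":grey_exclamation:".toList),
    ("?".toList, ":grey_question:".toList),
    ("0".toList, ":zero:".toList), ("1".toList, ":one:".toList), ("2".toList, ":two:".toList),
    ("3".toList, ":three:".toList), ("4".toList, ":four:".toList), ("5".toList, ":five:".toList),
    ("6".toList, ":six:".toList), ("7".toList, ":seven:".toList), ("8".toList, ":eight:".toList),
    ("9".toList, ":nine:".toList), ("#".toList, ":hash:".toList), ("*".toList, ":asterisk:".toList)]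

-- for i in range(0, len(text)): if text[i].upper() in dict: emojiText += "" + dict[text[i].upper()]
def text_to_emoji (text : String) : String :=
  let cs := text.toList
  let emojiText :=
    (PySem.List.pyRange 0 (PySem.List.len cs) 1).foldl
      (fun acc i =>
        let u := PySem.Chars.upper [PySem.List.pyGetD cs i ' ']
        if pvADict.contains u then acc ++ ([] ++ pvADict.getD u []) else acc) []
  String.ofList emojiText

-- ===== PORT B =====
-- B's small special-symbol dict (everything except the letters).
def pvBSpecials : PySem.Dict (List Char) (List Char) :=
  PySem.Dict.ofList [
    (" ".toList, " ".toList), ("!".toList, ":grey_exclamation:".toList),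
    ("?".toList, ":grey_question:".toList),
    ("0".toList, ":zero:".toList), ("1".toList, ":one:".toList), ("2".toList, ":two:".toList),
    ("3".toList, ":three:".toList), ("4".toList, ":four:".toList), ("5".toList, ":five:".toList),
    ("6".toList, ":six:".toList), ("7".toList, ":seven:".toList), ("8".toList, ":eight:".toList),
    ("9".toList, ":nine:".toList), ("#".toList, ":hash:".toList), ("*".toList, ":asterisk:".toList)]

-- for ch in text: u = ch.upper(); if "A" <= u <= "Z": append computed letter emoji;
-- elif u in specials: append specials[u]; return "".join(parts).
-- ch.upper() on one char is PySem.Chars.upperChar; "A" <= u <= "Z" on the 1-char string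
-- is the Char comparison.
def text_to_emoji_alt (text : String) : String :=
  let parts :=
    text.toList.foldl
      (fun parts ch =>
        let u := PySem.Chars.upperChar ch
        if 'A' ≤ u ∧ u ≤ 'Z' then
          parts ++ [":regional_indicator_".toList ++ [PySem.Chars.lowerChar u] ++ [':']]
        else if pvBSpecials.contains [u] then parts ++ [pvBSpecials.getD [u] []]
        else parts) []
  String.ofList (PySem.Chars.join [] parts)

-- ===== PRECONDITION & SPEC =====
def Spec_text_to_emoji (text : String) (out : String) : Prop := out = text_to_emoji_alt text
instance (text : String) (out : String) : Decidable (Spec_text_to_emoji text out) := by unfold Spec_text_to_emoji; infer_instance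

-- ===== CLAIM (what is proved, stated in full; the proofs are below) =====
def Claim_equal_text_to_emoji : Prop := ∀ (text : String), Dom_text_to_emoji text → Spec_text_to_emoji text (text_to_emoji text)

-- ===== LEMMAS AND PROOFS =====

-- per-character contribution of A's loop body
def pvStepA (c : Char) : List Char :=
  let u := PySem.Chars.upper [c]
  if pvADict.contains u then [] ++ pvADict.getD u [] else []

-- per-character contribution of B's loop body (the appended parts)
def pvPartB (c : Char) : List (List Char) :=
  let u := PySem.Chars.upperChar c
  if 'A' ≤ u ∧ u ≤ 'Z' then [":regional_indicator_".toList ++ [PySem.Chars.lowerChar u] ++ [':']]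
  else if pvBSpecials.contains [u] then [pvBSpecials.getD [u] []]
  else []

theorem pv_join_nil_flatten (ps : List (List Char)) :
    PySem.Chars.join [] ps = ps.flatten := by
  simp only [PySem.Chars.join, List.intercalate]
  induction ps with
  | nil => rfl
  | cons p ps ih =>
    cases ps with
    | nil => simp
    | cons q qs => simp_all [List.intersperse]

set_option maxRecDepth 40000 in
theorem pv_step_eq_dom :
    ∀ n < 128, pvStepA (Char.ofNat n) = (pvPartB (Char.ofNat n)).flatten := by decide

theorem pv_step_eq (c : Char) (h : pvDomChar c = true) :
    pvStepA c = (pvPartB c).flatten := by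
  have hn : c.toNat < 128 := by
    simp only [pvDomChar, Bool.or_eq_true, Bool.and_eq_true, decide_eq_true_eq,
      beq_iff_eq] at h
    omega
  have := pv_step_eq_dom c.toNat hn
  rwa [Char.ofNat_toNat] at this

set_option maxRecDepth 8192 in
theorem pv_foldlA (cs : List Char) :
    ∀ acc, cs.foldl
      (fun acc c =>
        let u := PySem.Chars.upper [c]
        if pvADict.contains u then acc ++ ([] ++ pvADict.getD u []) else acc) acc
      = acc ++ cs.flatMap pvStepA := by
  induction cs with
  | nil => simp
  | cons c cs ih =>
    intro acc
    simp only [List.foldl_cons, List.flatMap_cons, ih, pvStepA]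
    split <;> simp only [List.append_assoc, List.nil_append]

set_option maxRecDepth 8192 in
theorem pv_foldlB (cs : List Char) :
    ∀ acc, cs.foldl
      (fun parts ch =>
        let u := PySem.Chars.upperChar ch
        if 'A' ≤ u ∧ u ≤ 'Z' then
          parts ++ [":regional_indicator_".toList ++ [PySem.Chars.lowerChar u] ++ [':']]
        else if pvBSpecials.contains [u] then parts ++ [pvBSpecials.getD [u] []]
        else parts) acc
      = acc ++ cs.flatMap pvPartB := by
  induction cs with
  | nil => simp
  | cons c cs ih =>
    intro acc
    simp only [List.foldl_cons, List.flatMap_cons, ih, pvPartB]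
    split
    · simp only [List.append_assoc, List.singleton_append]
    · split <;> simp only [List.append_assoc, List.singleton_append, List.nil_append]

-- ===== VERDICT (by name: the statement is the Claim_ definition above) =====
theorem pv_main (cs : List Char) (h : ∀ c ∈ cs, pvDomChar c = true) :
    cs.flatMap pvStepA = (cs.flatMap pvPartB).flatten := by
  induction cs with
  | nil => rfl
  | cons c cs ih =>
    simp only [List.flatMap_cons, List.flatten_append]
    rw [pv_step_eq c (h c (by simp)), ih (fun x hx => h x (List.mem_cons_of_mem _ hx))]

theorem text_to_emoji_spec : Claim_equal_text_to_emoji := by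
  intro text hdom
  have hall : ∀ c ∈ text.toList, pvDomChar c = true := by
    simp only [Dom_text_to_emoji, pvDomStr, List.all_eq_true] at hdom
    exact hdom
  simp only [Spec_text_to_emoji, text_to_emoji, text_to_emoji_alt]
  rw [PySem.List.foldl_pyRange_pyGetD text.toList ' '
    (fun acc c =>
      if pvADict.contains (PySem.Chars.upper [c]) = true then
        acc ++ ([] ++ pvADict.getD (PySem.Chars.upper [c]) [])
      else acc) [] (a := 0) (by norm_num)]
  simp only [Int.toNat_zero, List.drop_zero]
  rw [pv_foldlA, pv_foldlB, pv_join_nil_flatten, pv_main text.toList hall]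
  simp
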